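/- GENERATED by mk_final_copies.py from the proof of the farm's unit `start_decoder.C5b` (farm:start_decoder.C5b.1: Lemmas.lean) as the
   re-elaboration sweep compiled it — do not edit. -/
import Asan.CheckWalk
import Vorbis.Spec.Units.start_decoder_C5b
import Vorbis.Spec.StartDecoderCarry
import Vorbis.Spec.StartDecoderC7

open X86 X86.User Asan Vorbis Vorbis.Spec Vorbis.Spec.StartDecoder

set_option maxRecDepth 100000
set_option maxHeartbeats 4000000

namespace Vorbis.Spec.start_decoder_C5b

/-- A window of segment C5b: the stack below the steady rsp (the pushed return addresses of the two check calls, of `error`, of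
`memcpy`, and their frames), the pointer field `codeword_lengths` `[c + 8, c + 16)` of the struct `cb(i)` at `c`, `f->eof` /
`f->error` `[f + 136, f + 144)`, or a window inside a block allocated since the head of the iteration (memcpy's destination). -/
def C5bWin (g : Ghost) (Ai : Arena) (A : Arena × List Obj) (c : Nat) (w : Span) : Prop :=
  (g.R - 408 ≤ w.lo ∧ w.hi ≤ g.R) ∨ (c + 8 ≤ w.lo ∧ w.hi ≤ c + 16) ∨ (g.f + 136 ≤ w.lo ∧ w.hi ≤ g.f + 144) ∨ Young Ai A w

/-- **THE INVARIANT SIDE OF SEGMENT C5b** (the twin of `c6a_carry` of the worked unit C6a, for the pointer field at offset 8 and with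
a young window): from `Frame` and CUR(i) at `v` and a later state `s` whose memory differs from `v.mem` only in windows `C5bWin` (no
shadow byte): `Frame` at the new program counter, CUR(i), `cb(i)` unmoved, and the struct's bytes before and after the field
`codeword_lengths` are kept (`Block.Kept`: every other field reads the same). -/
theorem c5b_carry {u₀ : State} {g : Ghost} {pc pc' : Word} {i : Nat} {A2 A3 Ai : Arena} {A : Arena × List Obj} {v s : State}
    {ws : List Span} (hfr : Frame u₀ g pc A v) (hcur : Cur g i A2 A3 Ai A v)
    (hs : Mem.SameExcept ws v.mem s.mem) (hun : ShadowUntouched v.mem s.mem)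
    (hok : ∀ w, w ∈ ws → C5bWin g Ai A (g.cb v.mem i) w)
    (hrip : s.rip = pc') (hrsp : s.reg .rsp = v.reg .rsp) (hcode : CodeOK u₀ s.mem) (hinv : abiInv s)
    (hr14 : s.reg .r14 = v.reg .r14) :
    Frame u₀ g pc' A s ∧ Cur g i A2 A3 Ai A s ∧ g.cb s.mem i = g.cb v.mem i ∧
      (⟨g.cb v.mem i, 8⟩ : Block).Kept v.mem s.mem ∧ (⟨g.cb v.mem i + 16, 2104⟩ : Block).Kept v.mem s.mem := by
  have hpos : Pos g A := Pos.of hfr hcur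
  have hm0 : MInv g i A2 A3 Ai A v.mem := MInv.of hfr hcur
  have hcw := hm0.c_where
  have p1 := hpos.r_eq
  have p2 := hpos.ra_lo
  have p3 := hpos.ra_hi
  have p4 := hpos.f_lo
  have p5 := hpos.f_hi
  have p6 := hpos.f_stack
  have p7 := hpos.objOut
  have p9 := hpos.ar_lo
  have p10 := hpos.ar_hi
  have p11 := hpos.ar_stack
  -- the struct lies inside the codebooks block, a block of the snapshot `Ai`: a young window misses it
  have hcbOK := hcur.ages.cbOK
  have hci := hcbOK.cb_in i hcur.lt
  have hF2 : Ai.Blk (codebooksBlock v.mem g.f) := hcbOK.F2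
  have hcdef : stb_vorbis.codebooks_at v.mem g.f i = g.cb v.mem i := rfl
  simp only [vblock, voff] at hci
  rw [hcdef] at hci
  have hyoung : ∀ w, Young Ai A w → w.hi ≤ g.cb v.mem i ∨ g.cb v.mem i + 2120 ≤ w.lo := by
    intro w hw
    have k := hw.2.2 _ hF2
    simp only [vblock, voff] at k
    omega
  have hok0 : ∀ w, w ∈ ws → OkWin g Ai A (g.cb v.mem i) w := by
    intro w hw
    have k := hok w hw
    unfold C5bWin at k
    rcases k with k | k | k | k
    · left
      unfold OkWin0
      omega
    · left
      unfold OkWin0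
      omega
    · left
      unfold OkWin0
      omega
    · right
      exact k
  have hb : Bits (g.Blk A) g.len s.mem g.f := by
    apply bits_kept hpos hcur.sd.bits hs
    intro w hw
    have k := hok w hw
    unfold C5bWin Young at k
    omega
  have hfr' := Frame.step hfr hcur hs hun hok0 hb hrip hrsp hcode hinv
  obtain ⟨hcur', hcb⟩ := Cur.step hfr hcur hs hun hok0 hb hr14
  refine ⟨hfr', hcur', hcb, ?_, ?_⟩
  · apply Block.Kept.of_sameExcept hs _ (by simp only []; omega)
    intro w hw
    have k := hok w hw
    unfold C5bWin at k
    simp only []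
    rcases k with k | k | k | k
    · omega
    · omega
    · omega
    · have := hyoung w k
      omega
  · apply Block.Kept.of_sameExcept hs _ (by simp only []; omega)
    intro w hw
    have k := hok w hw
    unfold C5bWin at k
    simp only []
    rcases k with k | k | k | k
    · omega
    · omega
    · omega
    · have := hyoung w k
      omega

/-- The fields of the book that the store `c->codeword_lengths = p` does not touch read the same (the bytes `[c, c + 8)` and
`[c + 16, c + 2120)`): `dimensions`, `entries`, `sparse`, hence K1, and the seven fresh fields. -/
theorem c5b_fields {m m' : Mem} {c : Nat} (hlo : (⟨c, 8⟩ : Block).Kept m m') (hhi : (⟨c + 16, 2104⟩ : Block).Kept m m') :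
    Codebook.entries m' c = Codebook.entries m c ∧ Codebook.sparse m' c = Codebook.sparse m c ∧
      (Codebook.K1 m c → Codebook.K1 m' c) ∧ (Fresh7 m c → Fresh7 m' c) := by
  have e_dim : Codebook.dimensions m' c = Codebook.dimensions m c := by
    simp only [vacc, voff]
    exact hlo.i32 _ (by simp only []; omega) (by simp only []; omega)
  have e_ent : Codebook.entries m' c = Codebook.entries m c := by
    simp only [vacc, voff]
    exact hlo.i32 _ (by simp only []; omega) (by simp only []; omega)
  have e_sp : Codebook.sparse m' c = Codebook.sparse m c := by
    simp only [vacc, voff]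
    exact hhi.u8 _ (by simp only []; omega) (by simp only []; omega)
  have e_lt : Codebook.lookup_type m' c = Codebook.lookup_type m c := by
    simp only [vacc, voff]
    exact hhi.u8 _ (by simp only []; omega) (by simp only []; omega)
  have e_lv : Codebook.lookup_values m' c = Codebook.lookup_values m c := by
    simp only [vacc, voff]
    exact hhi.u32 _ (by simp only []; omega) (by simp only []; omega)
  have e_mu : Codebook.multiplicands m' c = Codebook.multiplicands m c := by
    simp only [vacc, voff]
    exact hhi.ptr _ (by simp only []; omega) (by simp only []; omega)
  have e_cw : Codebook.codewords m' c = Codebook.codewords m c := by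
    simp only [vacc, voff]
    exact hhi.ptr _ (by simp only []; omega) (by simp only []; omega)
  have e_sc : Codebook.sorted_codewords m' c = Codebook.sorted_codewords m c := by
    simp only [vacc, voff]
    exact hhi.ptr _ (by simp only []; omega) (by simp only []; omega)
  have e_sv : Codebook.sorted_values m' c = Codebook.sorted_values m c := by
    simp only [vacc, voff]
    exact hhi.ptr _ (by simp only []; omega) (by simp only []; omega)
  have e_se : Codebook.sorted_entries m' c = Codebook.sorted_entries m c := by
    simp only [vacc, voff]
    exact hhi.i32 _ (by simp only []; omega) (by simp only []; omega)
  refine ⟨e_ent, e_sp, ?_, ?_⟩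
  · intro hk
    exact ⟨by rw [e_dim]; exact hk.dim_pos, by rw [e_dim]; exact hk.dim_le, by rw [e_ent]; exact hk.ent_nonneg,
      by rw [e_ent]; exact hk.ent_lt⟩
  · intro fr
    exact
      { lookup_type := by rw [e_lt]; exact fr.lookup_type
        lookup_values := by rw [e_lv]; exact fr.lookup_values
        multiplicands := by rw [e_mu]; exact fr.multiplicands
        sorted_codewords := by rw [e_sc]; exact fr.sorted_codewords
        sorted_values := by rw [e_sv]; exact fr.sorted_values
        codewords := by rw [e_cw]; exact fr.codewords
        sorted_entries := by rw [e_se]; exact fr.sorted_entries }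

/-- **`In5N` at the return of `memcpy`, pure part**: from `In5M` at the segment's entry state `v`, `Frame` / CUR(i) at the returned
state `w` (`c5b_carry`), the kept parts of the struct, the stored pointer `codeword_lengths = p` (a block of `E` bytes allocated since
`Ai`), the copied bytes (memcpy's post joined with the unchanged bytes of the temp block), and the registers. -/
theorem c5b_build {u₀ : State} {g : Ghost} {i : Nat} {A2 A3 Ai : Arena} {A : Arena × List Obj} {lengths p : Nat} {v w : State}
    (h : In5M u₀ g i A2 A3 Ai A lengths v) (hF : Frame u₀ g L.start_decoder.cut111 A w) (hC : Cur g i A2 A3 Ai A w)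
    (hcb : g.cb w.mem i = g.cb v.mem i)
    (hlo : (⟨g.cb v.mem i, 8⟩ : Block).Kept v.mem w.mem) (hhi : (⟨g.cb v.mem i + 16, 2104⟩ : Block).Kept v.mem w.mem)
    (hcl : Codebook.codeword_lengths w.mem (g.cb v.mem i) = p)
    (hblk : Since Ai A.1 ⟨p, (Codebook.entries v.mem (g.cb v.mem i)).toNat⟩)
    (hcopy : ∀ j, j < (Codebook.entries v.mem (g.cb v.mem i)).toNat → w.mem.u8 (p + j) = v.mem.u8 (lengths + j))
    (hrbx : w.reg .rbx = v.reg .rbx) (hr13 : w.reg .r13 = addr (g.cb v.mem i + 4)) :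
    In5N u₀ g i A2 A3 Ai A lengths w := by
  obtain ⟨e_ent, e_sp, hk1, hf7⟩ := c5b_fields hlo hhi
  exact
    { frame := hF
      cur := hC
      k1 := by rw [hcb]; exact hk1 h.k1
      sparse1 := by rw [hcb, e_sp]; exact h.sparse1
      rbx := by rw [hrbx]; exact h.rbx
      r13 := by rw [hcb]; exact hr13
      temps := by rw [hcb, e_ent]; exact h.temps
      block := by rw [hcb, hcl, e_ent]; exact hblk
      lenL := by rw [hcb, hcl, e_ent]; exact h.lenL.copy hcopy
      fresh := by rw [hcb]; exact hf7 h.fresh }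

end Vorbis.Spec.start_decoder_C5b
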